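-- pv_equiv track=rewrite | github.com/bawsi99/stockanalyzerpro_backend | agents/patterns/cross_validation_agent/conflict_detector.py | _generate_conflict_summary
-- ===== SOURCE A (Python) =====
-- from typing import Dict, Any, List, Tuple, Optional
--
-- def _generate_conflict_summary(conflicts: List[Dict[str, Any]], patterns: List[Dict[str, Any]]) -> str:
--     """Generate human-readable conflict summary"""
--     try:
--         if not conflicts:
--             return f"No conflicts detected among {len(patterns)} patterns. Patterns show good coherence."
--
--         high_conflicts = len([c for c in conflicts if c.get('severity') == 'high'])
--         medium_conflicts = len([c for c in conflicts if c.get('severity') == 'medium'])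
--         low_conflicts = len([c for c in conflicts if c.get('severity') == 'low'])
--
--         summary = f"Detected {len(conflicts)} conflicts among {len(patterns)} patterns: "
--
--         conflict_parts = []
--         if high_conflicts > 0:
--             conflict_parts.append(f"{high_conflicts} high severity")
--         if medium_conflicts > 0:
--             conflict_parts.append(f"{medium_conflicts} medium severity")
--         if low_conflicts > 0:
--             conflict_parts.append(f"{low_conflicts} low severity")
--
--         summary += ", ".join(conflict_parts) + "."
--
--         # Add specific conflict types
--         directional = len([c for c in conflicts if c.get('conflict_type') == 'directional_conflict'])
--         if directional > 0:
--             summary += f" Includes {directional} directional conflict(s) requiring resolution."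
--
--         return summary
--
--     except Exception:
--         return f"Conflict analysis completed for {len(patterns)} patterns with {len(conflicts)} issues identified."
-- ===== SOURCE B (Python) =====
-- def _generate_conflict_summary(conflicts, patterns):
--     """Generate human-readable conflict summary (single tally pass)."""
--     if not conflicts:
--         return f"No conflicts detected among {len(patterns)} patterns. Patterns show good coherence."
--
--     sev = {}
--     directional = 0
--     for c in conflicts:
--         s = c.get('severity')
--         sev[s] = sev.get(s, 0) + 1
--         if c.get('conflict_type') == 'directional_conflict':
--             directional += 1
--
--     parts = [f"{sev[k]} {k} severity" for k in ('high', 'medium', 'low') if sev.get(k, 0) > 0]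
--
--     summary = f"Detected {len(conflicts)} conflicts among {len(patterns)} patterns: " + ", ".join(parts) + "."
--     if directional > 0:
--         summary += f" Includes {directional} directional conflict(s) requiring resolution."
--     return summary
-- ===== Notes on version B (the rewrite author's own statement) =====
-- stated objective: simpler
-- what changed: Replaces the four separate list-comprehension scans (high/medium/low/directional) with a single pass over conflicts that builds a severity tally dict and a directional counter, then assembles the same string from the tally.
import Mathlib
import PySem

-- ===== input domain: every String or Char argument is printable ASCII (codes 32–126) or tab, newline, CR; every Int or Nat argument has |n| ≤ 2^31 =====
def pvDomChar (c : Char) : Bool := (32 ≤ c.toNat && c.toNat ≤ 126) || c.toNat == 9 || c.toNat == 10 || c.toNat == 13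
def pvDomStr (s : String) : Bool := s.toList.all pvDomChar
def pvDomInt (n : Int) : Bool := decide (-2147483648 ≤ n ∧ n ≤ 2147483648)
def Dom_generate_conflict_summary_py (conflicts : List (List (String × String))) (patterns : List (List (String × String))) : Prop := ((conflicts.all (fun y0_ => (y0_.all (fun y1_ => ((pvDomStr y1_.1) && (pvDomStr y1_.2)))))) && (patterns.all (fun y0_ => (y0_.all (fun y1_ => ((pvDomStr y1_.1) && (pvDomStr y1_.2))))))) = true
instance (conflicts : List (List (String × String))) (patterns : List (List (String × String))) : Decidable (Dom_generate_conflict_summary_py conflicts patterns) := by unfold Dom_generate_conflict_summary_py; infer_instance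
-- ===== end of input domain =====

-- B replaces A's four separate filter passes by one tally pass (severity dict + directional
-- counter) read back after the loop; same output, stated as the simpler decomposition.

-- ===== PORT A =====
-- literal port of A: four list-comprehension counts, then string assembly.
-- A's `except Exception` branch is unreachable (no statement in the body can raise), so it has no port.
def generate_conflict_summary_py (conflicts : List (List (String × String))) (patterns : List (List (String × String))) : String :=
  if conflicts.isEmpty then
    "No conflicts detected among " ++ PySem.Int.toStr (patterns.length : Int) ++ " patterns. Patterns show good coherence."
  else
    let high_conflicts : Int := ((conflicts.filter (fun c => PySem.Dict.get? (PySem.Dict.mk c) "severity" == some "high")).length : Int)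
    let medium_conflicts : Int := ((conflicts.filter (fun c => PySem.Dict.get? (PySem.Dict.mk c) "severity" == some "medium")).length : Int)
    let low_conflicts : Int := ((conflicts.filter (fun c => PySem.Dict.get? (PySem.Dict.mk c) "severity" == some "low")).length : Int)
    let summary := "Detected " ++ PySem.Int.toStr (conflicts.length : Int) ++ " conflicts among " ++ PySem.Int.toStr (patterns.length : Int) ++ " patterns: "
    let conflict_parts : List String := []
    let conflict_parts := if high_conflicts > 0 then conflict_parts ++ [PySem.Int.toStr high_conflicts ++ " high severity"] else conflict_parts
    let conflict_parts := if medium_conflicts > 0 then conflict_parts ++ [PySem.Int.toStr medium_conflicts ++ " medium severity"] else conflict_parts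
    let conflict_parts := if low_conflicts > 0 then conflict_parts ++ [PySem.Int.toStr low_conflicts ++ " low severity"] else conflict_parts
    let summary := summary ++ PySem.Str.join ", " conflict_parts ++ "."
    let directional : Int := ((conflicts.filter (fun c => PySem.Dict.get? (PySem.Dict.mk c) "conflict_type" == some "directional_conflict")).length : Int)
    if directional > 0 then
      summary ++ " Includes " ++ PySem.Int.toStr directional ++ " directional conflict(s) requiring resolution."
    else summary

-- ===== PORT B =====
-- literal port of Source B: one fold building (severity tally, directional count), then assembly.
def generate_conflict_summary_py_alt (conflicts : List (List (String × String))) (patterns : List (List (String × String))) : String :=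
  if conflicts.isEmpty then
    "No conflicts detected among " ++ PySem.Int.toStr (patterns.length : Int) ++ " patterns. Patterns show good coherence."
  else
    let st := conflicts.foldl (fun (st : PySem.Dict (Option String) Int × Int) c =>
        let s := PySem.Dict.get? (PySem.Dict.mk c) "severity"
        let sev := st.1.insert s (st.1.getD s 0 + 1)
        let dir := if PySem.Dict.get? (PySem.Dict.mk c) "conflict_type" == some "directional_conflict" then st.2 + 1 else st.2
        (sev, dir)) (PySem.Dict.empty, 0)
    let sev := st.1
    let directional := st.2
    let parts : List String := ["high", "medium", "low"].foldl (fun acc k =>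
        if sev.getD (some k) 0 > 0 then acc ++ [PySem.Int.toStr (sev.getD (some k) 0) ++ " " ++ k ++ " severity"] else acc) []
    let summary := "Detected " ++ PySem.Int.toStr (conflicts.length : Int) ++ " conflicts among " ++ PySem.Int.toStr (patterns.length : Int) ++ " patterns: " ++ PySem.Str.join ", " parts ++ "."
    if directional > 0 then
      summary ++ " Includes " ++ PySem.Int.toStr directional ++ " directional conflict(s) requiring resolution."
    else summary

-- ===== PRECONDITION & SPEC =====
def Spec_generate_conflict_summary_py (conflicts : List (List (String × String))) (patterns : List (List (String × String))) (out : String) : Prop := out = generate_conflict_summary_py_alt conflicts patterns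
instance (conflicts : List (List (String × String))) (patterns : List (List (String × String))) (out : String) : Decidable (Spec_generate_conflict_summary_py conflicts patterns out) := by unfold Spec_generate_conflict_summary_py; infer_instance

-- ===== CLAIM (what is proved, stated in full; the proofs are below) =====
def Claim_equal_generate_conflict_summary_py : Prop := ∀ (conflicts : List (List (String × String))) (patterns : List (List (String × String))), Dom_generate_conflict_summary_py conflicts patterns → Spec_generate_conflict_summary_py conflicts patterns (generate_conflict_summary_py conflicts patterns)

-- ===== LEMMAS AND PROOFS =====

-- the fold over the pair splits: first component is the tally fold over the severity keys
theorem pv_fold_fst (l : List (List (String × String))) (d0 : PySem.Dict (Option String) Int) (n0 : Int) :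
    (l.foldl (fun (st : PySem.Dict (Option String) Int × Int) c =>
        (st.1.insert (PySem.Dict.get? (PySem.Dict.mk c) "severity") (st.1.getD (PySem.Dict.get? (PySem.Dict.mk c) "severity") 0 + 1),
         if PySem.Dict.get? (PySem.Dict.mk c) "conflict_type" == some "directional_conflict" then st.2 + 1 else st.2)) (d0, n0)).1
    = (l.map (fun c => PySem.Dict.get? (PySem.Dict.mk c) "severity")).foldl
        (fun d s => d.insert s (d.getD s 0 + 1)) d0 := by
  induction l generalizing d0 n0 with
  | nil => rfl
  | cons c t ih =>
    rw [List.foldl_cons, List.map_cons, List.foldl_cons]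
    exact ih _ _

-- second component counts the directional conflicts
theorem pv_fold_snd (l : List (List (String × String))) (d0 : PySem.Dict (Option String) Int) (n0 : Int) :
    (l.foldl (fun (st : PySem.Dict (Option String) Int × Int) c =>
        (st.1.insert (PySem.Dict.get? (PySem.Dict.mk c) "severity") (st.1.getD (PySem.Dict.get? (PySem.Dict.mk c) "severity") 0 + 1),
         if PySem.Dict.get? (PySem.Dict.mk c) "conflict_type" == some "directional_conflict" then st.2 + 1 else st.2)) (d0, n0)).2
    = n0 + ((l.filter (fun c => PySem.Dict.get? (PySem.Dict.mk c) "conflict_type" == some "directional_conflict")).length : Int) := by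
  induction l generalizing d0 n0 with
  | nil => simp
  | cons c t ih =>
    rw [List.foldl_cons]
    by_cases h : (PySem.Dict.get? (PySem.Dict.mk c) "conflict_type" == some "directional_conflict") = true
    · rw [if_pos h, ih]
      simp only [List.filter_cons, h, if_true, List.length_cons]
      push_cast; ring
    · rw [if_neg h, ih]
      simp only [List.filter_cons, h, Bool.false_eq_true, if_false]

-- merging the string literals of B's f-string with A's
theorem pv_seg (s k : String) : s ++ " " ++ k ++ " severity" = s ++ (" " ++ k ++ " severity") := by
  rw [String.append_assoc, String.append_assoc, String.append_assoc]

-- the tally read back at a key is A's filter count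
theorem pv_tally_getD (l : List (List (String × String))) (v : Option String) :
    ((l.map (fun c => PySem.Dict.get? (PySem.Dict.mk c) "severity")).foldl
        (fun (d : PySem.Dict (Option String) Int) s => d.insert s (d.getD s 0 + 1)) PySem.Dict.empty).getD v 0
    = ((l.filter (fun c => PySem.Dict.get? (PySem.Dict.mk c) "severity" == v)).length : Int) := by
  rw [PySem.Dict.foldl_insert_getD_add_one_eq_counter, PySem.Dict.getD_counter]
  rw [List.count_eq_countP, List.countP_map, List.countP_eq_length_filter]
  rfl

-- ===== VERDICT (by name: the statement is the Claim_ definition above) =====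
theorem generate_conflict_summary_py_spec : Claim_equal_generate_conflict_summary_py := by
  intro conflicts patterns _
  unfold Spec_generate_conflict_summary_py generate_conflict_summary_py generate_conflict_summary_py_alt
  by_cases h : conflicts.isEmpty
  · simp [h]
  · simp only [h, Bool.false_eq_true, if_false]
    rw [pv_fold_fst, pv_fold_snd]
    simp only [List.foldl_cons, List.foldl_nil, pv_tally_getD, zero_add, pv_seg]
    rfl
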